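-- pv_equiv track=rewrite | github.com/Kenseki/qishi_algo | divide_and_conquer/beautiful_array.py | beautifulArray
-- ===== SOURCE A (Python) =====
-- def beautifulArray(N):
--     memo = {1: [1]}
--     def f(N):
--         if N not in memo:
--             odds = f((N+1)//2)
--             evens = f(N//2)
--             memo[N] = [2*x-1 for x in odds] + [2*x for x in evens]
--         return memo[N]
--     return f(N)
-- ===== SOURCE B (Python) =====
-- def beautifulArray(N):
--     res = [1]
--     while len(res) < N:
--         res = [2*x-1 for x in res if 2*x-1 <= N] + [2*x for x in res if 2*x <= N]
--     return res
-- ===== Notes on version B (the rewrite author's own statement) =====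
-- stated objective: simpler
-- what changed: Replaces the top-down memoized recursion (dict of sub-results, size-halving into odds/evens) with a bottom-up iterative doubling: start from [1] and repeatedly map x to 2x-1 and 2x, filtering values above N, until the array has length N.
-- outside the precondition, e.g. on beautifulArray(0): A raises RecursionError, B returns [1]
import Mathlib
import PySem

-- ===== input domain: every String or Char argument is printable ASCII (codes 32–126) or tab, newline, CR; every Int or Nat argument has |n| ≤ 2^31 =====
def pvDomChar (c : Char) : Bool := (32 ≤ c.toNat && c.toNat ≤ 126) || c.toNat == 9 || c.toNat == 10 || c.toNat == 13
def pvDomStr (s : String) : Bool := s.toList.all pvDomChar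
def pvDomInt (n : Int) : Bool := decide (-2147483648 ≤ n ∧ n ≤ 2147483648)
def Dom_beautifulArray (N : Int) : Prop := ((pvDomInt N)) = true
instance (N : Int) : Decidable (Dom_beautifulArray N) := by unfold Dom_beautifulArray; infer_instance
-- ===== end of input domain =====

-- B replaces A's memoized top-down size-halving recursion with a bottom-up iterative
-- doubling build (objective: simpler). Equivalence is about the return value.

-- ===== PORT A =====
-- memoized inner f, memo threaded through; fuel only makes the recursion total
-- (N+1 levels is always enough inside Pre_: the argument strictly decreases).
def pvFA : Nat → PySem.Dict Int (List Int) → Int → Option (PySem.Dict Int (List Int) × List Int)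
  | 0, _, _ => none
  | fuel + 1, memo, n =>
    match memo.get? n with
    | some v => some (memo, v)
    | none =>
      match pvFA fuel memo (PySem.Int.floordiv (n + 1) 2) with
      | none => none
      | some (m1, odds) =>
        match pvFA fuel m1 (PySem.Int.floordiv n 2) with
        | none => none
        | some (m2, evens) =>
          let v := odds.map (fun x => 2 * x - 1) ++ evens.map (fun x => 2 * x)
          some (m2.insert n v, v)

def beautifulArray (N : Int) : List Int :=
  match pvFA (N.toNat + 1) (PySem.Dict.empty.insert 1 [1]) N with
  | some (_, v) => v
  | none => []   -- unreachable under Pre_ (fuel guard only)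

-- ===== PORT B =====
-- 'while len(res) < N: res = [2x-1 …] + [2x …]'; fuel only makes the loop total
-- (the length strictly grows each pass, so N+1 passes always suffice inside Pre_).
def pvLoopB : Nat → Int → List Int → List Int
  | 0, _, res => res
  | fuel + 1, n, res =>
    if (res.length : Int) < n then
      pvLoopB fuel n
        ((res.filter (fun x => 2 * x - 1 ≤ n)).map (fun x => 2 * x - 1) ++
         (res.filter (fun x => 2 * x ≤ n)).map (fun x => 2 * x))
    else res

def beautifulArray_alt (N : Int) : List Int := pvLoopB (N.toNat + 1) N [1]

-- ===== PRECONDITION & SPEC =====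
-- Pre_ excludes exactly N ≤ 0, on which A's inner f recurses forever and raises RecursionError.
def Pre_beautifulArray (N : Int) : Prop := 1 ≤ N
instance (N : Int) : Decidable (Pre_beautifulArray N) := by unfold Pre_beautifulArray; infer_instance
def pvWitness_beautifulArray : Int := (5)

def Spec_beautifulArray (N : Int) (out : List Int) : Prop := out = beautifulArray_alt N
instance (N : Int) (out : List Int) : Decidable (Spec_beautifulArray N out) := by unfold Spec_beautifulArray; infer_instance

-- ===== CLAIM (what is proved, stated in full; the proofs are below) =====
def Claim_equal_beautifulArray : Prop := ∀ (N : Int), Dom_beautifulArray N → Pre_beautifulArray N → Spec_beautifulArray N (beautifulArray N)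

-- ===== LEMMAS AND PROOFS =====

-- The mathematical beautiful array of size n (proof-side reference function).
def pvG : Nat → List Int
  | 0 => []
  | 1 => [1]
  | (n + 2) =>
    (pvG ((n + 3) / 2)).map (fun x => 2 * x - 1) ++ (pvG ((n + 2) / 2)).map (fun x => 2 * x)
decreasing_by all_goals omega

theorem pvG_unfold (n : Nat) :
    pvG n = (pvG ((n + 1) / 2)).map (fun x => 2 * x - 1) ++ (pvG (n / 2)).map (fun x => 2 * x) := by
  match n with
  | 0 => norm_num [pvG]
  | 1 => norm_num [pvG]
  | (n + 2) => rw [pvG]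

theorem pvG_mem_bounds (n : Nat) : ∀ x ∈ pvG n, 1 ≤ x ∧ x ≤ (n : Int) := by
  induction n using Nat.strong_induction_on with
  | _ n ih =>
    match n with
    | 0 => intro x hx; simp [pvG] at hx
    | 1 => intro x hx; simp [pvG] at hx; omega
    | (m + 2) =>
      intro x hx
      rw [pvG] at hx
      rcases List.mem_append.mp hx with h | h <;>
        obtain ⟨y, hy, rfl⟩ := List.mem_map.mp h
      · have := ih ((m + 3) / 2) (by omega) y hy
        have : 1 ≤ y ∧ y ≤ (((m + 3) / 2 : Nat) : Int) := this
        constructor <;> [omega; (push_cast at this ⊢; omega)]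
      · have := ih ((m + 2) / 2) (by omega) y hy
        constructor <;> [omega; (push_cast at this ⊢; omega)]

theorem pvG_length (n : Nat) : (pvG n).length = n := by
  induction n using Nat.strong_induction_on with
  | _ n ih =>
    match n with
    | 0 => simp [pvG]
    | 1 => simp [pvG]
    | (m + 2) =>
      rw [pvG]
      simp only [List.length_append, List.length_map]
      rw [ih ((m + 3) / 2) (by omega), ih ((m + 2) / 2) (by omega)]
      omega

-- filtering the beautiful array of size k down to values ≤ c gives the one of size min c k
theorem pvG_filter (k : Nat) : ∀ c : Nat,
    (pvG k).filter (fun x => decide (x ≤ (c : Int))) = pvG (min c k) := by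
  induction k using Nat.strong_induction_on with
  | _ k ih =>
    intro c
    by_cases hck : k ≤ c
    · rw [Nat.min_eq_right hck, List.filter_eq_self.mpr]
      intro x hx
      have := pvG_mem_bounds k x hx
      simp; omega
    · have hmin : min c k = c := Nat.min_eq_left (by omega)
      rw [hmin]
      match k with
      | 0 => omega
      | 1 =>
        have : c = 0 := by omega
        subst this; norm_num [pvG]
      | (m + 2) =>
        rw [pvG, List.filter_append, List.filter_map, List.filter_map]
        have h1 : ((pvG ((m + 3) / 2)).filter
            (Function.comp (fun x => decide (x ≤ (c : Int))) (fun x => 2 * x - 1)))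
            = (pvG ((m + 3) / 2)).filter (fun x => decide (x ≤ (((c + 1) / 2 : Nat) : Int))) := by
          apply List.filter_congr
          intro x _; simp [Function.comp]; constructor <;> intro h <;> push_cast at * <;> omega
        have h2 : ((pvG ((m + 2) / 2)).filter
            (Function.comp (fun x => decide (x ≤ (c : Int))) (fun x => 2 * x)))
            = (pvG ((m + 2) / 2)).filter (fun x => decide (x ≤ ((c / 2 : Nat) : Int))) := by
          apply List.filter_congr
          intro x _; simp [Function.comp]; constructor <;> intro h <;> push_cast at * <;> omega
        rw [h1, h2, ih ((m + 3) / 2) (by omega) ((c + 1) / 2), ih ((m + 2) / 2) (by omega) (c / 2)]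
        have e1 : min ((c + 1) / 2) ((m + 3) / 2) = (c + 1) / 2 := by omega
        have e2 : min (c / 2) ((m + 2) / 2) = c / 2 := by omega
        rw [e1, e2, ← pvG_unfold c]

-- ===== A side =====

def pvMemOK (memo : PySem.Dict Int (List Int)) : Prop :=
  memo.get? 1 = some [1] ∧ ∀ k v, memo.get? k = some v → v = pvG k.toNat

theorem pvFA_spec : ∀ fuel : Nat, ∀ (N : Int) (memo : PySem.Dict Int (List Int)),
    1 ≤ N → N.toNat < fuel → pvMemOK memo →
    ∃ memo', pvFA fuel memo N = some (memo', pvG N.toNat) ∧ pvMemOK memo' := by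
  intro fuel
  induction fuel with
  | zero => intro N memo h1 h2 _; omega
  | succ fuel ih =>
    intro N memo h1 h2 hm
    rw [pvFA]
    cases hget : memo.get? N with
    | some v =>
      exact ⟨memo, by simp [hm.2 N v hget], hm⟩
    | none =>
      have hN1 : N ≠ 1 := fun h => by rw [h] at hget; rw [hm.1] at hget; cases hget
      have hN2 : 2 ≤ N := by omega
      have hf1 : PySem.Int.floordiv (N + 1) 2 = (N + 1) / 2 :=
        PySem.Int.floordiv_eq_ediv_of_pos (by omega)
      have hf2 : PySem.Int.floordiv N 2 = N / 2 :=
        PySem.Int.floordiv_eq_ediv_of_pos (by omega)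
      obtain ⟨m1, he1, hm1⟩ := ih ((N + 1) / 2) memo (by omega) (by omega) hm
      obtain ⟨m2, he2, hm2⟩ := ih (N / 2) m1 (by omega) (by omega) hm1
      simp only [hf1, hf2, he1, he2]
      have harg1 : ((N + 1) / 2).toNat = (N.toNat + 1) / 2 := by omega
      have harg2 : (N / 2).toNat = N.toNat / 2 := by omega
      refine ⟨m2.insert N
          ((pvG ((N + 1) / 2).toNat).map (fun x => 2 * x - 1) ++
           (pvG (N / 2).toNat).map (fun x => 2 * x)), ?_, ?_, ?_⟩
      · simp only [harg1, harg2, ← pvG_unfold N.toNat]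
      · rw [PySem.Dict.get?_insert_of_ne _ _ (by omega : (1 : Int) ≠ N)]; exact hm2.1
      · intro k v hkv
        by_cases hk : k = N
        · subst hk
          rw [PySem.Dict.get?_insert_self] at hkv
          cases hkv
          rw [harg1, harg2, ← pvG_unfold]
        · rw [PySem.Dict.get?_insert_of_ne _ _ hk] at hkv
          exact hm2.2 k v hkv

theorem beautifulArray_eq_pvG (N : Int) (h : 1 ≤ N) : beautifulArray N = pvG N.toNat := by
  have hm : pvMemOK (PySem.Dict.empty.insert 1 [1]) := by
    constructor
    · exact PySem.Dict.get?_insert_self _ _ _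
    · intro k v hkv
      by_cases hk : k = (1 : Int)
      · subst hk
        rw [PySem.Dict.get?_insert_self] at hkv
        cases hkv; norm_num [pvG]
      · rw [PySem.Dict.get?_insert_of_ne _ _ hk, PySem.Dict.get?_empty] at hkv
        cases hkv
  obtain ⟨m', he, _⟩ := pvFA_spec (N.toNat + 1) N _ h (by omega) hm
  rw [beautifulArray, he]

-- ===== B side =====

theorem pvLoopB_spec : ∀ fuel k : Nat, ∀ N : Int, 1 ≤ N →
    1 ≤ k → k ≤ N.toNat → N.toNat ≤ k + fuel →
    pvLoopB fuel N (pvG k) = pvG N.toNat := by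
  intro fuel
  induction fuel with
  | zero =>
    intro k N _ _ h2 h3
    have : k = N.toNat := by omega
    rw [pvLoopB, this]
  | succ fuel ih =>
    intro k N hN h1 h2 h3
    rw [pvLoopB]
    by_cases hlt : ((pvG k).length : Int) < N
    · rw [if_pos hlt]
      rw [pvG_length] at hlt
      have hkN : k < N.toNat := by omega
      have hc1 : (fun x : Int => decide (2 * x - 1 ≤ N)) =
          (fun x : Int => decide (x ≤ (((N.toNat + 1) / 2 : Nat) : Int))) := by
        funext x; simp; constructor <;> intro h <;> push_cast at * <;> omega
      have hc2 : (fun x : Int => decide (2 * x ≤ N)) =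
          (fun x : Int => decide (x ≤ ((N.toNat / 2 : Nat) : Int))) := by
        funext x; simp; constructor <;> intro h <;> push_cast at * <;> omega
      rw [hc1, hc2, pvG_filter k ((N.toNat + 1) / 2), pvG_filter k (N.toNat / 2)]
      set a := min ((N.toNat + 1) / 2) k with ha
      set b := min (N.toNat / 2) k with hb
      have hsplit : (a = k ∧ b = k ∧ k ≤ N.toNat / 2) ∨
          (a = (N.toNat + 1) / 2 ∧ b = N.toNat / 2 ∧ N.toNat / 2 < k) := by omega
      have hstep : (pvG a).map (fun x => 2 * x - 1) ++ (pvG b).map (fun x => 2 * x)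
          = pvG (a + b) := by
        rcases hsplit with ⟨e1, e2, _⟩ | ⟨e1, e2, _⟩
        · rw [e1, e2, pvG_unfold (k + k)]
          congr 2 <;> congr 1 <;> omega
        · rw [e1, e2]
          have hsum : (N.toNat + 1) / 2 + N.toNat / 2 = N.toNat := by omega
          rw [hsum, pvG_unfold N.toNat]
      rw [hstep]
      exact ih (a + b) N hN (by omega) (by omega) (by omega)
    · rw [if_neg hlt]
      rw [pvG_length] at hlt
      have : k = N.toNat := by omega
      rw [this]

theorem beautifulArray_alt_eq_pvG (N : Int) (h : 1 ≤ N) : beautifulArray_alt N = pvG N.toNat := by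
  have h1 : pvG 1 = [1] := by norm_num [pvG]
  rw [beautifulArray_alt, ← h1]
  exact pvLoopB_spec (N.toNat + 1) 1 N h (by omega) (by omega) (by omega)

-- ===== VERDICT (by name: the statement is the Claim_ definition above) =====
theorem beautifulArray_spec : Claim_equal_beautifulArray := by
  intro N _ hpre
  unfold Spec_beautifulArray
  rw [beautifulArray_eq_pvG N hpre, beautifulArray_alt_eq_pvG N hpre]
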